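-- pv_equiv track=rewrite | github.com/dwalton76/rubiks-cube-NxNxN-solver | rubikscubennnsolver/__init__.py | _www_square_indexes
-- ===== SOURCE A (Python) =====
-- from typing import List, Tuple, Union
--
-- def _www_square_indexes(size: int) -> Tuple[List[int], List[int], List[int]]:
--     """
--     Args:
--         size: the size of the cube
--
--     Returns:
--         a list of the first square on each side
--         a list of the last square on each side
--         a list of the last square on sides U, B and D
--     """
--     squares_per_side = size * size
--     max_square = squares_per_side * 6
--     first_squares = []
--     last_squares = []
--
--     for index in range(1, max_square + 1):
--         if (index - 1) % squares_per_side == 0: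
--             first_squares.append(index)
--         elif index % squares_per_side == 0:
--             last_squares.append(index)
--
--     last_UBD_squares = [last_squares[0], last_squares[4], last_squares[5]]
--     return (first_squares, last_squares, last_UBD_squares)
-- ===== SOURCE B (Python) =====
-- def _www_square_indexes(size):
--     squares_per_side = size * size
--     first_squares = [i * squares_per_side + 1 for i in range(6)]
--     last_squares = [(i + 1) * squares_per_side for i in range(6)]
--     last_UBD_squares = [last_squares[0], last_squares[4], last_squares[5]]
--     return (first_squares, last_squares, last_UBD_squares)
-- ===== Notes on version B (the rewrite author's own statement) =====
-- stated objective: faster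
-- what changed: Replaces the scan over every square index of the cube (testing each with two modulo conditions) by a closed-form per-side comprehension: first = i*squares_per_side + 1, last = (i+1)*squares_per_side.
-- outside the precondition, e.g. on _www_square_indexes(1): A raises IndexError, B returns ([1, 2, 3, 4, 5, 6], [1, 2, 3, 4, 5, 6], [1, 5, 6]); on _www_square_indexes(-1): A raises IndexError, B returns ([1, 2, 3, 4, 5, 6], [1, 2, 3, 4, 5, 6], [1, 5, 6]); on _www_square_indexes(0): A raises IndexError, B returns ([1, 1, 1, 1, 1, 1], [0, 0, 0, 0, 0, 0], [0, 0, 0])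
import Mathlib
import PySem

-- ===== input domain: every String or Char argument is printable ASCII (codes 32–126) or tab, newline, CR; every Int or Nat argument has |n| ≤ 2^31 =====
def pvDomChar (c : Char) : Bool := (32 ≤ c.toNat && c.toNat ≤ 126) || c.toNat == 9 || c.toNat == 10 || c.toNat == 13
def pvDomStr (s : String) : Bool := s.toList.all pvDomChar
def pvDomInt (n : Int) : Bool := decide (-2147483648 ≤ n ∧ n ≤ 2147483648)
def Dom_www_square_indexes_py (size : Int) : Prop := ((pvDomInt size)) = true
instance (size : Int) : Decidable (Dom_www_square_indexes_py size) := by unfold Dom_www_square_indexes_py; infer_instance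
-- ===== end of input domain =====

-- B replaces A's scan of all 6*size^2 indices by a closed-form list per side (asymptotically faster).

-- ===== PORT A =====
-- the loop body of A: two modulo tests, appending to first_squares / last_squares
def pvStepA (n : Int) (st : List Int × List Int) (i : Int) : List Int × List Int :=
  if PySem.Int.mod (i - 1) n = 0 then (st.1 ++ [i], st.2)
  else if PySem.Int.mod i n = 0 then (st.1, st.2 ++ [i])
  else st

def www_square_indexes_py (size : Int) : List Int × List Int × List Int :=
  let squaresPerSide := size * size
  let maxSquare := squaresPerSide * 6
  let p := (PySem.List.pyRange 1 (maxSquare + 1) 1).foldl (pvStepA squaresPerSide) ([], [])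
  -- last_squares[0]/[4]/[5]: in Python an out-of-range index raises IndexError;
  -- pyGetD with default 0 is exact on Pre_ (the indices exist there), unclaimed outside
  (p.1, p.2, [PySem.List.pyGetD p.2 0 0, PySem.List.pyGetD p.2 4 0, PySem.List.pyGetD p.2 5 0])

-- ===== PORT B =====
def www_square_indexes_py_alt (size : Int) : List Int × List Int × List Int :=
  let n := size * size
  let firstSquares := (PySem.List.pyRange 0 6 1).map (fun i => i * n + 1)
  let lastSquares := (PySem.List.pyRange 0 6 1).map (fun i => (i + 1) * n)
  (firstSquares, lastSquares,
   [PySem.List.pyGetD lastSquares 0 0, PySem.List.pyGetD lastSquares 4 0, PySem.List.pyGetD lastSquares 5 0])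

-- ===== PRECONDITION & SPEC =====
-- Pre_ excludes size ∈ {-1, 0, 1}: there A's last_squares stays empty and last_squares[0] raises IndexError.
def Pre_www_square_indexes_py (size : Int) : Prop := size ≤ -2 ∨ 2 ≤ size
instance (size : Int) : Decidable (Pre_www_square_indexes_py size) := by unfold Pre_www_square_indexes_py; infer_instance
def pvWitness_www_square_indexes_py : Int := (3)

def Spec_www_square_indexes_py (size : Int) (out : List Int × List Int × List Int) : Prop := out = www_square_indexes_py_alt size
instance (size : Int) (out : List Int × List Int × List Int) : Decidable (Spec_www_square_indexes_py size out) := by unfold Spec_www_square_indexes_py; infer_instance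

-- ===== CLAIM (what is proved, stated in full; the proofs are below) =====
def Claim_equal_www_square_indexes_py : Prop := ∀ (size : Int), Dom_www_square_indexes_py size → Pre_www_square_indexes_py size → Spec_www_square_indexes_py size (www_square_indexes_py size)

-- ===== LEMMAS AND PROOFS =====

-- running A's loop over the tail of a block (indices c-k .. c, k ≤ n-2, n ∣ c):
-- no index hits the first-square branch; only c hits the last-square branch
lemma pv_not_dvd (n d : Int) (h1 : 1 ≤ d) (h2 : d < n) : ¬ n ∣ d := by
  intro hd
  have := Int.le_of_dvd (by omega) hd
  omega

lemma pv_run (n c : Int) (hn : 2 ≤ n) (hc : n ∣ c) :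
    ∀ (k : Nat), (k : Int) ≤ n - 2 → ∀ (F L : List Int),
      (PySem.List.pyRange (c - k) (c + 1) 1).foldl (pvStepA n) (F, L) = (F, L ++ [c]) := by
  intro k
  induction k with
  | zero =>
    intro _ F L
    simp only [Nat.cast_zero, sub_zero]
    rw [PySem.List.pyRange_one_singleton]
    have h1 : PySem.Int.mod (c - 1) n ≠ 0 := by
      simp only [ne_eq, PySem.Int.mod_eq_zero_iff_dvd]
      intro hd
      exact pv_not_dvd n 1 (by omega) (by omega)
        (by have := dvd_sub hc hd; simpa using this)
    have h2 : PySem.Int.mod c n = 0 := (PySem.Int.mod_eq_zero_iff_dvd c n).mpr hc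
    simp [pvStepA, h1, h2]
  | succ k ih =>
    intro hk F L
    simp only [Nat.cast_add, Nat.cast_one] at hk ⊢
    rw [PySem.List.pyRange_one_cons (by omega : c - ((k : Int) + 1) < c + 1)]
    have h1 : PySem.Int.mod (c - ((k : Int) + 1) - 1) n ≠ 0 := by
      simp only [ne_eq, PySem.Int.mod_eq_zero_iff_dvd]
      intro hd
      exact pv_not_dvd n ((k : Int) + 2) (by omega) (by omega)
        (by have := dvd_sub hc hd
            simpa [show c - (c - ((k : Int) + 1) - 1) = (k : Int) + 2 by ring] using this)
    have h2 : PySem.Int.mod (c - ((k : Int) + 1)) n ≠ 0 := by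
      simp only [ne_eq, PySem.Int.mod_eq_zero_iff_dvd]
      intro hd
      exact pv_not_dvd n ((k : Int) + 1) (by omega) (by omega)
        (by have := dvd_sub hc hd
            simpa [show c - (c - ((k : Int) + 1)) = (k : Int) + 1 by ring] using this)
    rw [List.foldl_cons]
    rw [show pvStepA n (F, L) (c - ((k : Int) + 1)) = (F, L) by simp [pvStepA, h1, h2]]
    rw [show c - ((k : Int) + 1) + 1 = c - (k : Int) by ring]
    exact ih (by omega) F L

-- one full block of n indices (c-n+1 .. c, n ∣ c): appends c-n+1 to first and c to last
lemma pv_block (n c : Int) (hn : 2 ≤ n) (hc : n ∣ c) (F L : List Int) :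
    (PySem.List.pyRange (c - n + 1) (c + 1) 1).foldl (pvStepA n) (F, L)
      = (F ++ [c - n + 1], L ++ [c]) := by
  rw [PySem.List.pyRange_one_cons (by omega : c - n + 1 < c + 1)]
  have h1 : PySem.Int.mod (c - n) n = 0 := by
    rw [PySem.Int.mod_eq_zero_iff_dvd]
    exact dvd_sub hc (dvd_refl n)
  rw [List.foldl_cons]
  rw [show pvStepA n (F, L) (c - n + 1) = (F ++ [c - n + 1], L) from by
    simp [pvStepA, show c - n + 1 - 1 = c - n by ring, h1]]
  have hcast : ((n - 2).toNat : Int) = n - 2 := by omega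
  have := pv_run n c hn hc (n - 2).toNat (by omega) (F ++ [c - n + 1]) L
  rwa [hcast, show c - (n - 2) = c - n + 1 + 1 by ring] at this

-- A's loop over j whole blocks produces the closed-form lists
lemma pv_main (n : Int) (hn : 2 ≤ n) :
    ∀ (j : Nat),
      (PySem.List.pyRange 1 ((j : Int) * n + 1) 1).foldl (pvStepA n) ([], [])
        = ((List.range j).map (fun t => (t : Int) * n + 1),
           (List.range j).map (fun t => ((t : Int) + 1) * n)) := by
  intro j
  induction j with
  | zero => simp [PySem.List.pyRange_one_eq_nil]
  | succ j ih =>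
    have hj : (0 : Int) ≤ (j : Int) * n := by positivity
    simp only [Nat.cast_add, Nat.cast_one]
    rw [PySem.List.pyRange_one_append 1 ((j : Int) * n + 1) (((j : Int) + 1) * n + 1)
      (by omega) (by nlinarith)]
    rw [List.foldl_append, ih]
    have hblk := pv_block n (((j : Int) + 1) * n) hn ⟨(j : Int) + 1, by ring⟩
      ((List.range j).map (fun t => (t : Int) * n + 1))
      ((List.range j).map (fun t => ((t : Int) + 1) * n))
    rw [show ((j : Int) + 1) * n - n + 1 = (j : Int) * n + 1 by ring] at hblk
    rw [hblk]
    simp [List.range_succ]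

-- ===== VERDICT (by name: the statement is the Claim_ definition above) =====
theorem www_square_indexes_py_spec : Claim_equal_www_square_indexes_py := by
  intro size _ hpre
  have hn : 2 ≤ size * size := by
    rcases hpre with h | h <;> nlinarith
  have hmain := pv_main (size * size) hn 6
  simp only [Spec_www_square_indexes_py, www_square_indexes_py, www_square_indexes_py_alt]
  rw [show size * size * 6 + 1 = ((6 : Nat) : Int) * (size * size) + 1 by push_cast; ring]
  rw [hmain]
  simp [List.range_succ, PySem.List.pyRange, PySem.List.pyGetD]
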